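-- pv_equiv track=rewrite | github.com/Johndsalas/decoding_activity | activity_templet/encryption.py | swap_first_and_last_letter
-- ===== SOURCE A (Python) =====
-- def swap_first_and_last_letter(message):
--
--     # create empty string
--     encrypted_message = ''
--
--     # convert message string to list of words in string
--     message_list = message.split(' ')
--
--     # for each word in the list get the start and end letter
--     for word in message_list:
--
--         start_letter = word[0]
--
--         end_letter = word[-1]
--
--         # if the word is grater than 2 letters capture other letters in the string
--         # then assign last_letter plus other_letters plus start_letter plus 'space' to new_word
--         if len(word) > 2:
--
--             other_letters = word[1:-1]
--
--             new_word = end_letter + other_letters + start_letter + ' '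
--
--         # if the word is two letters long add end_letter plus start_letter plus 'space' to new_word
--         elif len(word) == 2:
--
--             new_word = end_letter + start_letter + ' '
--
--         # if word is one letter add word plus space to new_word
--         else:
--
--             new_word = word + ' '
--
--         # add new_word to encrypted_message
--         encrypted_message += new_word
--
--     return encrypted_message.strip() # remove ' ' at end of message
-- ===== SOURCE B (Python) =====
-- def swap_first_and_last_letter(message):
--     n = len(message)
--     # starts[k] = index of the first character of the word containing position k
--     starts = []
--     b = 0
--     for k in range(n):
--         if message[k] == ' ':
--             b = k + 1
--         starts.append(b)
--     # ends[k] = index of the last character of the word containing position k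
--     ends = []
--     e = n - 1
--     for k in reversed(range(n)):
--         if message[k] == ' ':
--             e = k - 1
--         ends.append(e)
--     ends.reverse()
--     # each output character is computed positionally: word-initial positions get
--     # the word's last character, word-final positions its first, others unchanged
--     out = []
--     for k in range(n):
--         c = message[k]
--         if c == ' ':
--             out.append(' ')
--         elif k == starts[k]:
--             out.append(message[ends[k]])
--         elif k == ends[k]:
--             out.append(message[starts[k]])
--         else:
--             out.append(c)
--     return ''.join(out).strip()
-- ===== Notes on version B (the rewrite author's own statement) =====
-- stated objective: alternative
-- what changed: Replaces A's split-into-words / per-word three-branch rebuild / string accumulation by a positional algorithm: two boundary passes precompute for every character position the first and last index of its word, then each output character is computed in place (word-initial positions get the word's last character, word-final its first, all others unchanged); no word list is ever built.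
-- outside the precondition, e.g. on swap_first_and_last_letter(' '): A raises IndexError, B returns ''; on swap_first_and_last_letter(''): A raises IndexError, B returns ''
import Mathlib
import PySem

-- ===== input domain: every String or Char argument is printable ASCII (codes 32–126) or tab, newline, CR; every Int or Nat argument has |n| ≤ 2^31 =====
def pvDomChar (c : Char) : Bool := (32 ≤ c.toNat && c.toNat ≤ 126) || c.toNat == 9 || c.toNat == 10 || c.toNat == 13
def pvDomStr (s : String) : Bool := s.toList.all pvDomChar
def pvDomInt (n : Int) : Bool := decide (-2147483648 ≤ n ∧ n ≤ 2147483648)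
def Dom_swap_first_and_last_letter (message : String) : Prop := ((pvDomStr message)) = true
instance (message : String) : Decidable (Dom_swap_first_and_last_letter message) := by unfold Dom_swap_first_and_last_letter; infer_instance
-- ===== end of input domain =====

-- B replaces A's split-into-words / three-branch word rebuild / string accumulation by a
-- positional algorithm: two boundary passes record each position's word start and word end,
-- then every output character is computed in place (objective: alternative).

-- ===== PORT A =====
def swap_first_and_last_letter (message : String) : String :=
  let message_list := PySem.Chars.splitOn message.toList [' ']
  let encrypted_message :=
    message_list.foldl (fun encrypted_message word =>
      encrypted_message ++
        (let start_letter := (PySem.List.pyGet? word (0 : Int)).getD ' '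
         let end_letter := (PySem.List.pyGet? word (-1 : Int)).getD ' '
         if word.length > 2 then
           let other_letters := PySem.List.slice word (some 1) (some (-1))
           [end_letter] ++ other_letters ++ [start_letter] ++ [' ']
         else if word.length == 2 then
           [end_letter] ++ [start_letter] ++ [' ']
         else
           word ++ [' '])) []
  String.ofList (PySem.Chars.strip encrypted_message)

-- ===== PORT B =====
-- Source B's first pass: starts[k] = index of first character of the word containing k
def pvStarts : List Char → Nat → Nat → List Nat
  | [], _, _ => []
  | c :: rest, k, b =>
      let b' := if c = ' ' then k + 1 else b
      b' :: pvStarts rest (k + 1) b'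

-- Source B's second pass, over `reversed(range(n))`: here the traversal is written as a walk
-- down s.reverse with the descending counter k; the produced list is reversed afterwards,
-- exactly as Source B does `ends.reverse()`
def pvEnds : List Char → Int → Int → List Int
  | [], _, _ => []
  | c :: rest, k, e =>
      let e' := if c = ' ' then k - 1 else e
      e' :: pvEnds rest (k - 1) e'

def swap_first_and_last_letter_alt (message : String) : String :=
  let s := message.toList
  let n := s.length
  let starts := pvStarts s 0 0
  let ends := (pvEnds s.reverse ((n : Int) - 1) ((n : Int) - 1)).reverse
  let out := (List.range n).map (fun k =>
    let c := s.getD k ' '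
    if c = ' ' then ' '
    else if k = starts.getD k 0 then s.getD (ends.getD k 0).toNat ' '
    else if (k : Int) = ends.getD k 0 then s.getD (starts.getD k 0) ' '
    else c)
  String.ofList (PySem.Chars.strip out)

-- ===== PRECONDITION & SPEC =====
-- Pre_ excludes messages whose split on ' ' yields an empty word (empty message,
-- leading/trailing or doubled spaces): there A raises IndexError (word[0]).
def Pre_swap_first_and_last_letter (message : String) : Prop :=
  ∀ w ∈ PySem.Chars.splitOn message.toList [' '], w ≠ []
instance (message : String) : Decidable (Pre_swap_first_and_last_letter message) := by
  unfold Pre_swap_first_and_last_letter; infer_instance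
def pvWitness_swap_first_and_last_letter : String := "hello big world"

def Spec_swap_first_and_last_letter (message : String) (out : String) : Prop := out = swap_first_and_last_letter_alt message
instance (message : String) (out : String) : Decidable (Spec_swap_first_and_last_letter message out) := by unfold Spec_swap_first_and_last_letter; infer_instance

-- ===== CLAIM (what is proved, stated in full; the proofs are below) =====
def Claim_equal_swap_first_and_last_letter : Prop := ∀ (message : String), Dom_swap_first_and_last_letter message → Pre_swap_first_and_last_letter message → Spec_swap_first_and_last_letter message (swap_first_and_last_letter message)

-- ===== LEMMAS AND PROOFS =====

-- proof-level names for B's three passes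
def pvOutF (s : List Char) (k : Nat) : Char :=
  if s.getD k ' ' = ' ' then ' '
  else if k = (pvStarts s 0 0).getD k 0 then
    s.getD ((((pvEnds s.reverse ((s.length : Int) - 1) ((s.length : Int) - 1)).reverse).getD k 0).toNat) ' '
  else if (k : Int) = ((pvEnds s.reverse ((s.length : Int) - 1) ((s.length : Int) - 1)).reverse).getD k 0 then
    s.getD ((pvStarts s 0 0).getD k 0) ' '
  else s.getD k ' ' 

def pvOutOf (s : List Char) : List Char := (List.range s.length).map (pvOutF s)

theorem pvAlt_eq (m : String) :
    swap_first_and_last_letter_alt m = String.ofList (PySem.Chars.strip (pvOutOf m.toList)) := rfl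

-- the word-level swap both programs implement
def pvSwapWord : List Char → List Char
  | [] => []
  | [c] => [c]
  | c :: cs => cs.getLastD ' ' :: (cs.dropLast ++ [c])

-- ---------- basic facts about the two passes ----------

@[simp] theorem pvStarts_length (l : List Char) (k b : Nat) :
    (pvStarts l k b).length = l.length := by
  induction l generalizing k b with
  | nil => rfl
  | cons c rest ih => simp [pvStarts, ih]

@[simp] theorem pvEnds_length (l : List Char) (k e : Int) :
    (pvEnds l k e).length = l.length := by
  induction l generalizing k e with
  | nil => rfl
  | cons c rest ih => simp [pvEnds, ih]

theorem pvStarts_no (l : List Char) (k b : Nat) (h : ∀ c ∈ l, c ≠ ' ') :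
    pvStarts l k b = List.replicate l.length b := by
  induction l generalizing k with
  | nil => rfl
  | cons c rest ih =>
    have hc : c ≠ ' ' := h c (by simp)
    simp only [pvStarts, if_neg hc, List.length_cons, List.replicate_succ]
    exact congrArg (b :: ·) (ih (k + 1) (fun x hx => h x (by simp [hx])))

theorem pvStarts_sep (l1 l2 : List Char) (k b : Nat) :
    pvStarts (l1 ++ ' ' :: l2) k b =
      pvStarts l1 k b ++ (k + l1.length + 1) :: pvStarts l2 (k + l1.length + 1) (k + l1.length + 1) := by
  induction l1 generalizing k b with
  | nil => simp [pvStarts]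
  | cons c rest ih =>
    simp only [List.cons_append, pvStarts, List.length_cons]
    rw [ih]
    have : k + (rest.length + 1) + 1 = (k + 1) + rest.length + 1 := by omega
    rw [this]

theorem pvEnds_no_append (l1 r : List Char) (k e : Int) (h : ∀ c ∈ l1, c ≠ ' ') :
    pvEnds (l1 ++ r) k e = List.replicate l1.length e ++ pvEnds r (k - l1.length) e := by
  induction l1 generalizing k with
  | nil => simp
  | cons c rest ih =>
    have hc : c ≠ ' ' := h c (by simp)
    simp only [List.cons_append, pvEnds, if_neg hc, List.length_cons, List.replicate_succ]
    rw [ih (k - 1) (fun x hx => h x (by simp [hx]))]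
    have : k - 1 - (rest.length : Int) = k - ((rest.length : Int) + 1) := by omega
    rw [this]
    push_cast
    ring_nf

theorem pvEnds_cons_sep (r : List Char) (k e : Int) :
    pvEnds (' ' :: r) k e = (k - 1) :: pvEnds r (k - 1) (k - 1) := by
  simp [pvEnds]

theorem pvEnds_le (l : List Char) (k e m : Int) (hk : k - 1 ≤ m) (he : e ≤ m) :
    ∀ x ∈ pvEnds l k e, x ≤ m := by
  induction l generalizing k e with
  | nil => simp [pvEnds]
  | cons c rest ih =>
    intro x hx
    simp only [pvEnds, List.mem_cons] at hx
    rcases hx with hx | hx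
    · subst hx; split_ifs <;> omega
    · exact ih (k - 1) _ (by omega) (by split_ifs <;> omega) x hx

theorem pvStarts_getD_le (l : List Char) (k0 b i : Nat) (hb : b ≤ k0)
    (hi : i < l.length) (hc : l.getD i ' ' ≠ ' ') :
    (pvStarts l k0 b).getD i 0 ≤ k0 + i := by
  induction l generalizing k0 b i with
  | nil => simp at hi
  | cons c rest ih =>
    cases i with
    | zero =>
      have : c ≠ ' ' := by simpa using hc
      simp [pvStarts, this, hb]
    | succ j =>
      simp only [pvStarts, List.getD_cons_succ]
      have hb' : (if c = ' ' then k0 + 1 else b) ≤ k0 + 1 := by split_ifs <;> omega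
      have := ih (k0 + 1) _ j hb' (by simpa using hi) (by simpa using hc)
      omega

-- ---------- the word-block shape of B's output ----------

theorem pvSwapWord_map (w : List Char) :
    (List.range w.length).map (fun i =>
        if i = 0 then w.getD (w.length - 1) ' '
        else if i = w.length - 1 then w.getD 0 ' '
        else w.getD i ' ') = pvSwapWord w := by
  match w with
  | [] => rfl
  | [c] => simp [pvSwapWord, List.range_succ]
  | c :: d :: cs =>
    have hsw : pvSwapWord (c :: d :: cs) = (d :: cs).getLastD ' ' :: ((d :: cs).dropLast ++ [c]) := rfl
    rw [hsw]
    apply List.ext_getElem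
    · simp
    · intro i h1 h2
      simp only [List.getElem_map, List.getElem_range]
      simp only [List.length_map, List.length_range] at h1
      simp only [List.length_cons] at h1
      by_cases hi0 : i = 0
      · subst hi0
        rw [if_pos rfl, List.getElem_cons_zero,
          List.getD_eq_getElem _ _ (by simp),
          getElem_congr_idx (by simp : (c :: d :: cs).length - 1 = cs.length + 1),
          List.getElem_cons_succ, List.getLastD_eq_getLast?, List.getLast?_eq_getElem?,
          List.getElem?_eq_getElem (by simp)]
        simp
      · by_cases hil : i = (c :: d :: cs).length - 1
        · rw [if_neg hi0, if_pos hil]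
          rw [List.getD_eq_getElem _ _ (by simp)]
          simp only [List.getElem_cons_zero]
          have hlen : i = cs.length + 1 := by simp at hil; omega
          rw [getElem_congr_idx hlen, List.getElem_cons_succ,
            List.getElem_append_right (by simp)]
          simp
        · rw [if_neg hi0, if_neg hil]
          rw [List.getD_eq_getElem _ _ (by simpa using h1)]
          obtain ⟨j, rfl⟩ : ∃ j, i = j + 1 := ⟨i - 1, by omega⟩
          rw [List.getElem_cons_succ, List.getElem_cons_succ]
          have hj : j < ((d :: cs).dropLast ++ [c]).length := by simp; omega
          have hj' : j < (d :: cs).dropLast.length := by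
            simp only [List.length_cons] at hil
            simp [List.length_dropLast]; omega
          rw [List.getElem_append_left hj']
          rw [List.getElem_dropLast]

-- ---------- join (intercalate) facts ----------

theorem pv_join_cons (w : List Char) (ws : List (List Char)) (h : ws ≠ []) :
    PySem.Chars.join [' '] (w :: ws) = w ++ ' ' :: PySem.Chars.join [' '] ws := by
  obtain ⟨y, ys, rfl⟩ := List.exists_cons_of_ne_nil h
  rw [PySem.Chars.join_cons_cons]
  simp

theorem pv_join_append_last (ws : List (List Char)) (w : List Char) (h : ws ≠ []) :
    PySem.Chars.join [' '] (ws ++ [w]) = PySem.Chars.join [' '] ws ++ ' ' :: w := by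
  induction ws with
  | nil => cases h rfl
  | cons x xs ih =>
    cases hxs : xs with
    | nil =>
      subst hxs
      simp [PySem.Chars.join_cons_cons, PySem.Chars.join_singleton]
    | cons y ys =>
      rw [← hxs, List.cons_append, pv_join_cons _ _ (by simp [hxs]),
        ih (by simp [hxs]), pv_join_cons _ _ (by simp [hxs])]
      simp

-- ---------- B's positional output on a single space-free word ----------

theorem pvOut_single (w : List Char) (hw : ∀ c ∈ w, c ≠ ' ') :
    pvOutOf w = pvSwapWord w := by
  unfold pvOutOf
  rw [← pvSwapWord_map w]
  apply List.map_congr_left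
  intro k hk
  rw [List.mem_range] at hk
  unfold pvOutF
  have hrev : ∀ c ∈ w.reverse, c ≠ ' ' := fun c hc => hw c (by simpa using hc)
  have hst : pvStarts w 0 0 = List.replicate w.length 0 := pvStarts_no w 0 0 hw
  have hen : pvEnds w.reverse ((w.length : Int) - 1) ((w.length : Int) - 1)
      = List.replicate w.length ((w.length : Int) - 1) := by
    have := pvEnds_no_append w.reverse [] ((w.length : Int) - 1) ((w.length : Int) - 1) hrev
    simpa [pvEnds] using this
  rw [hst, hen, List.reverse_replicate]
  have hc : w.getD k ' ' ≠ ' ' := by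
    rw [List.getD_eq_getElem _ _ hk]
    exact hw _ (List.getElem_mem _)
  rw [if_neg hc]
  rw [List.getD_replicate _ hk, List.getD_replicate _ hk]
  have htn : ((w.length : Int) - 1).toNat = w.length - 1 := by omega
  by_cases h0 : k = 0
  · subst h0; simp [htn]
  · rw [if_neg h0, if_neg h0]
    by_cases hl : k = w.length - 1
    · have : (k : Int) = (w.length : Int) - 1 := by omega
      rw [if_pos this, if_pos hl]
    · have : (k : Int) ≠ (w.length : Int) - 1 := by omega
      rw [if_neg this, if_neg hl]

-- ---------- t-prefix and last-word segments of B's output on t ++ ' ' :: w ----------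

theorem pvOutF_prefix (t w : List Char) (hw : ∀ c ∈ w, c ≠ ' ') (k : Nat) (hk : k < t.length) :
    pvOutF (t ++ ' ' :: w) k = pvOutF t k := by
  unfold pvOutF
  have hlen : (t ++ ' ' :: w).length = t.length + 1 + w.length := by simp; omega
  -- starts decomposition
  have hst : pvStarts (t ++ ' ' :: w) 0 0
      = pvStarts t 0 0 ++ (t.length + 1) :: pvStarts w (t.length + 1) (t.length + 1) := by
    simpa using pvStarts_sep t w 0 0
  -- ends decomposition
  have hrev : (t ++ ' ' :: w).reverse = w.reverse ++ ' ' :: t.reverse := by simp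
  have hwrev : ∀ c ∈ w.reverse, c ≠ ' ' := fun c hc => hw c (by simpa using hc)
  have hN : ((t ++ ' ' :: w).length : Int) - 1 - (w.reverse.length : Int) = (t.length : Int) := by
    simp [hlen]; push_cast; omega
  have hen : pvEnds (t ++ ' ' :: w).reverse (((t ++ ' ' :: w).length : Int) - 1) (((t ++ ' ' :: w).length : Int) - 1)
      = List.replicate w.length (((t ++ ' ' :: w).length : Int) - 1)
        ++ ((t.length : Int) - 1) :: pvEnds t.reverse ((t.length : Int) - 1) ((t.length : Int) - 1) := by
    rw [hrev, pvEnds_no_append _ _ _ _ hwrev, hN, pvEnds_cons_sep]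
    simp
  have henr : (pvEnds (t ++ ' ' :: w).reverse (((t ++ ' ' :: w).length : Int) - 1) (((t ++ ' ' :: w).length : Int) - 1)).reverse
      = (pvEnds t.reverse ((t.length : Int) - 1) ((t.length : Int) - 1)).reverse
        ++ ((t.length : Int) - 1) :: List.replicate w.length (((t ++ ' ' :: w).length : Int) - 1) := by
    rw [hen]; simp
  rw [hst, henr]
  -- getD values agree on the prefix
  have hsg : (pvStarts t 0 0 ++ (t.length + 1) :: pvStarts w (t.length + 1) (t.length + 1)).getD k 0
      = (pvStarts t 0 0).getD k 0 := List.getD_append _ _ _ _ (by simpa using hk)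
  have heg : ((pvEnds t.reverse ((t.length : Int) - 1) ((t.length : Int) - 1)).reverse
        ++ ((t.length : Int) - 1) :: List.replicate w.length (((t ++ ' ' :: w).length : Int) - 1)).getD k 0
      = ((pvEnds t.reverse ((t.length : Int) - 1) ((t.length : Int) - 1)).reverse).getD k 0 :=
    List.getD_append _ _ _ _ (by simpa using hk)
  have hcg : (t ++ ' ' :: w).getD k ' ' = t.getD k ' ' := List.getD_append _ _ _ _ hk
  rw [hsg, heg, hcg]
  by_cases hsp : t.getD k ' ' = ' '
  · rw [if_pos hsp, if_pos hsp]
  · rw [if_neg hsp, if_neg hsp]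
    -- bounded reads stay inside t
    have hendb : ∀ x ∈ pvEnds t.reverse ((t.length : Int) - 1) ((t.length : Int) - 1),
        x ≤ (t.length : Int) - 1 :=
      pvEnds_le _ _ _ _ (by omega) (by omega)
    have hev : ((pvEnds t.reverse ((t.length : Int) - 1) ((t.length : Int) - 1)).reverse).getD k 0
        ≤ (t.length : Int) - 1 := by
      by_cases hkl : k < ((pvEnds t.reverse ((t.length : Int) - 1) ((t.length : Int) - 1)).reverse).length
      · rw [List.getD_eq_getElem _ _ hkl]
        exact hendb _ (by
          have := List.getElem_mem hkl
          simpa using this)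
      · simp at hkl; omega
    have hevn : (((pvEnds t.reverse ((t.length : Int) - 1) ((t.length : Int) - 1)).reverse).getD k 0).toNat < t.length := by
      omega
    have her : (t ++ ' ' :: w).getD (((pvEnds t.reverse ((t.length : Int) - 1) ((t.length : Int) - 1)).reverse).getD k 0).toNat ' '
        = t.getD (((pvEnds t.reverse ((t.length : Int) - 1) ((t.length : Int) - 1)).reverse).getD k 0).toNat ' ' :=
      List.getD_append _ _ _ _ hevn
    have hsv : (pvStarts t 0 0).getD k 0 ≤ k := by
      have := pvStarts_getD_le t 0 0 k (le_refl 0) hk hsp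
      omega
    have hsr : (t ++ ' ' :: w).getD ((pvStarts t 0 0).getD k 0) ' '
        = t.getD ((pvStarts t 0 0).getD k 0) ' ' :=
      List.getD_append _ _ _ _ (by omega)
    rw [her, hsr]

theorem pvOutF_lastword (t w : List Char) (hw : ∀ c ∈ w, c ≠ ' ') :
    List.map (pvOutF (t ++ ' ' :: w)) (List.range' (t.length + 1) w.length) = pvSwapWord w := by
  rw [List.range'_eq_map_range, List.map_map]
  rw [← pvSwapWord_map w]
  apply List.map_congr_left
  intro i hi
  rw [List.mem_range] at hi
  simp only [Function.comp_apply]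
  unfold pvOutF
  have hlen : (t ++ ' ' :: w).length = t.length + 1 + w.length := by simp; omega
  have hst : pvStarts (t ++ ' ' :: w) 0 0
      = pvStarts t 0 0 ++ (t.length + 1) :: pvStarts w (t.length + 1) (t.length + 1) := by
    simpa using pvStarts_sep t w 0 0
  have hwno : pvStarts w (t.length + 1) (t.length + 1)
      = List.replicate w.length (t.length + 1) := pvStarts_no w _ _ hw
  have hrev : (t ++ ' ' :: w).reverse = w.reverse ++ ' ' :: t.reverse := by simp
  have hwrev : ∀ c ∈ w.reverse, c ≠ ' ' := fun c hc => hw c (by simpa using hc)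
  have hN : ((t ++ ' ' :: w).length : Int) - 1 - (w.reverse.length : Int) = (t.length : Int) := by
    simp [hlen]; push_cast; omega
  have henr : (pvEnds (t ++ ' ' :: w).reverse (((t ++ ' ' :: w).length : Int) - 1) (((t ++ ' ' :: w).length : Int) - 1)).reverse
      = (pvEnds t.reverse ((t.length : Int) - 1) ((t.length : Int) - 1)).reverse
        ++ ((t.length : Int) - 1) :: List.replicate w.length (((t ++ ' ' :: w).length : Int) - 1) := by
    rw [hrev, pvEnds_no_append _ _ _ _ hwrev, hN, pvEnds_cons_sep]
    simp
  rw [hst, hwno, henr]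
  -- the read at position t.length + 1 + i
  have hcg : (t ++ ' ' :: w).getD (t.length + 1 + i) ' ' = w.getD i ' ' := by
    rw [List.getD_append_right _ _ _ _ (by omega)]
    have : t.length + 1 + i - t.length = i + 1 := by omega
    rw [this, List.getD_cons_succ]
  have hsg : (pvStarts t 0 0 ++ (t.length + 1) :: List.replicate w.length (t.length + 1)).getD (t.length + 1 + i) 0
      = t.length + 1 := by
    rw [List.getD_append_right _ _ _ _ (by simp; omega)]
    simp only [pvStarts_length]
    have : t.length + 1 + i - t.length = i + 1 := by omega
    rw [this, List.getD_cons_succ, List.getD_replicate _ hi]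
  have heg : ((pvEnds t.reverse ((t.length : Int) - 1) ((t.length : Int) - 1)).reverse
        ++ ((t.length : Int) - 1) :: List.replicate w.length (((t ++ ' ' :: w).length : Int) - 1)).getD (t.length + 1 + i) 0
      = ((t ++ ' ' :: w).length : Int) - 1 := by
    rw [List.getD_append_right _ _ _ _ (by simp; omega)]
    simp only [List.length_reverse, pvEnds_length]
    have : t.length + 1 + i - t.length = i + 1 := by omega
    rw [this, List.getD_cons_succ, List.getD_replicate _ hi]
  rw [hcg, hsg, heg]
  have hcsp : w.getD i ' ' ≠ ' ' := by
    rw [List.getD_eq_getElem _ _ hi]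
    exact hw _ (List.getElem_mem _)
  rw [if_neg hcsp]
  have htn : ((((t ++ ' ' :: w).length : Int)) - 1).toNat = t.length + 1 + (w.length - 1) := by
    rw [hlen]; omega
  by_cases h0 : i = 0
  · subst h0
    rw [if_pos (by omega), if_pos rfl, htn]
    rw [List.getD_append_right _ _ _ _ (by omega)]
    have : t.length + 1 + (w.length - 1) - t.length = (w.length - 1) + 1 := by omega
    rw [this, List.getD_cons_succ]
  · rw [if_neg (by omega), if_neg h0]
    by_cases hl : i = w.length - 1
    · have hcast : ((t.length + 1 + i : Nat) : Int) = ((t ++ ' ' :: w).length : Int) - 1 := by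
        rw [hlen]; push_cast; omega
      rw [if_pos hcast, if_pos hl]
      rw [List.getD_append_right _ _ _ _ (by omega)]
      have : t.length + 1 - t.length = 1 := by omega
      rw [this, List.getD_cons_succ]
    · have hcast : ((t.length + 1 + i : Nat) : Int) ≠ ((t ++ ' ' :: w).length : Int) - 1 := by
        rw [hlen]; push_cast; omega
      rw [if_neg hcast, if_neg hl]

-- ---------- B's output over a join of space-free words ----------

theorem pvOut_words (ws : List (List Char)) (hne : ws ≠ [])
    (hw : ∀ w ∈ ws, ∀ c ∈ w, c ≠ ' ') :
    pvOutOf (PySem.Chars.join [' '] ws) = PySem.Chars.join [' '] (ws.map pvSwapWord) := by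
  induction ws using List.reverseRecOn with
  | nil => cases hne rfl
  | append_singleton ws w ih =>
    cases hws : ws with
    | nil =>
      subst hws
      simp only [List.nil_append, List.map_cons, List.map_nil]
      rw [PySem.Chars.join_singleton, PySem.Chars.join_singleton]
      exact pvOut_single w (hw w (by simp))
    | cons x xs =>
      rw [← hws]
      have hne' : ws ≠ [] := by rw [hws]; simp
      have hwword : ∀ c ∈ w, c ≠ ' ' := hw w (by simp)
      rw [pv_join_append_last _ _ hne', List.map_append, List.map_cons, List.map_nil,
        pv_join_append_last _ _ (by rw [hws]; simp)]
      set t := PySem.Chars.join [' '] ws with ht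
      unfold pvOutOf
      have hlen : (t ++ ' ' :: w).length = t.length + (1 + w.length) := by simp; omega
      rw [hlen, List.range_eq_range', ← List.range'_append (s := 0) (m := t.length) (n := 1 + w.length) (step := 1)]
      have h2 : List.range' (0 + 1 * t.length) (1 + w.length) 1
          = t.length :: List.range' (t.length + 1) w.length 1 := by
        simp only [Nat.zero_add, Nat.one_mul]
        rw [show 1 + w.length = w.length + 1 from by omega]
        rw [List.range'_succ]
      rw [h2, List.map_append, List.map_cons]
      -- prefix segment
      have hpre : List.map (pvOutF (t ++ ' ' :: w)) (List.range' 0 t.length 1)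
          = PySem.Chars.join [' '] (ws.map pvSwapWord) := by
        rw [← List.range_eq_range']
        have : List.map (pvOutF (t ++ ' ' :: w)) (List.range t.length)
            = List.map (pvOutF t) (List.range t.length) := by
          apply List.map_congr_left
          intro k hk
          exact pvOutF_prefix t w hwword k (by simpa using hk)
        rw [this]
        have := ih hne' (fun x hx => hw x (by simp [hx]))
        unfold pvOutOf at this
        exact this
      -- the separating space
      have hsep : pvOutF (t ++ ' ' :: w) t.length = ' ' := by
        unfold pvOutF
        have : (t ++ ' ' :: w).getD t.length ' ' = ' ' := by
          rw [List.getD_append_right _ _ _ _ (le_refl _)]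
          simp
        rw [this]
        simp
      rw [hsep]
      -- the last word segment
      have hlast := pvOutF_lastword t w hwword
      rw [hlast, hpre]

-- ---------- splitOn characterisation (reconstruction) ----------

theorem pv_go_acc (fuel : Nat) (l cur : List Char) (acc : List (List Char)) :
    PySem.Chars.splitOn.go [' '] fuel l cur acc
      = acc.reverse ++ PySem.Chars.splitOn.go [' '] fuel l cur [] := by
  induction fuel generalizing l cur acc with
  | zero => simp [PySem.Chars.splitOn.go]
  | succ n ih =>
    cases l with
    | nil => simp [PySem.Chars.splitOn.go]
    | cons c rest =>
      rw [PySem.Chars.splitOn.go]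
      conv_rhs => rw [PySem.Chars.splitOn.go]
      split
      · rw [ih _ _ (cur.reverse :: acc), ih _ _ [cur.reverse]]
        simp
      · rw [ih rest (c :: cur) acc]

theorem pv_go_no (fuel : Nat) (l cur : List Char) (acc : List (List Char))
    (h : ∀ c ∈ l, c ≠ ' ') :
    PySem.Chars.splitOn.go [' '] fuel l cur acc = ((cur.reverse ++ l) :: acc).reverse := by
  induction fuel generalizing l cur acc with
  | zero => simp [PySem.Chars.splitOn.go]
  | succ n ih =>
    cases l with
    | nil => simp [PySem.Chars.splitOn.go]
    | cons c rest =>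
      rw [PySem.Chars.splitOn.go]
      have hc : c ≠ ' ' := h c (by simp)
      rw [if_neg (by simp [List.isPrefixOf]; exact fun h' => absurd h'.symm hc)]
      rw [ih rest (c :: cur) acc (fun x hx => h x (by simp [hx]))]
      simp

theorem pv_go_sep (w : List Char) (fuel : Nat) (t cur : List Char) (acc : List (List Char))
    (h : ∀ c ∈ w, c ≠ ' ') :
    PySem.Chars.splitOn.go [' '] (w.length + 1 + fuel) (w ++ ' ' :: t) cur acc
      = PySem.Chars.splitOn.go [' '] fuel t [] ((cur.reverse ++ w) :: acc) := by
  induction w generalizing cur with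
  | nil =>
    simp only [List.length_nil, List.nil_append]
    rw [show 0 + 1 + fuel = fuel + 1 from by omega]
    rw [PySem.Chars.splitOn.go]
    rw [if_pos (by simp [List.isPrefixOf])]
    simp
  | cons c rest ih =>
    have hc : c ≠ ' ' := h c (by simp)
    rw [show (c :: rest).length + 1 + fuel = (rest.length + 1 + fuel) + 1 from by simp; omega]
    rw [List.cons_append, PySem.Chars.splitOn.go]
    rw [if_neg (by simp [List.isPrefixOf]; exact fun h' => absurd h'.symm hc)]
    rw [ih (c :: cur) (fun x hx => h x (by simp [hx]))]
    simp

theorem pv_splitOn_no (s : List Char) (h : ∀ c ∈ s, c ≠ ' ') :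
    PySem.Chars.splitOn s [' '] = [s] := by
  unfold PySem.Chars.splitOn
  rw [pv_go_no _ _ _ _ h]
  simp

theorem pv_splitOn_sep (w t : List Char) (h : ∀ c ∈ w, c ≠ ' ') :
    PySem.Chars.splitOn (w ++ ' ' :: t) [' '] = w :: PySem.Chars.splitOn t [' '] := by
  unfold PySem.Chars.splitOn
  have hlen : (w ++ ' ' :: t).length + 1 = w.length + 1 + (t.length + 1) := by simp; omega
  rw [hlen, pv_go_sep w (t.length + 1) t [] [] h, pv_go_acc]
  simp

-- peel the first word off a string that contains a space
theorem pv_split_step (s : List Char) (hsp : ¬ ∀ c ∈ s, c ≠ ' ') :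
    ∃ w t, (∀ c ∈ w, c ≠ ' ') ∧ s = w ++ ' ' :: t ∧ t.length < s.length ∧
      PySem.Chars.splitOn s [' '] = w :: PySem.Chars.splitOn t [' '] := by
  push_neg at hsp
  obtain ⟨c0, hc0, hc0'⟩ := hsp
  have hne : List.dropWhile (fun x => decide (x ≠ ' ')) s ≠ [] := by
    intro h
    exact absurd (by simpa using List.dropWhile_eq_nil_iff.mp h c0 hc0) (by simp [hc0'])
  obtain ⟨d, t, hdt⟩ := List.exists_cons_of_ne_nil hne
  have hhead : (List.dropWhile (fun x => decide (x ≠ ' ')) s).head hne = d := by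
    rw [List.head_eq_iff_head?_eq_some, hdt]
    rfl
  have hd : d = ' ' := by
    have h2 := List.head_dropWhile_not (p := fun x => decide (x ≠ ' ')) (l := s) hne
    rw [hhead] at h2
    simpa using h2
  have htw : ∀ c ∈ List.takeWhile (fun x => decide (x ≠ ' ')) s, c ≠ ' ' := by
    intro c hc
    simpa using List.mem_takeWhile_imp hc
  refine ⟨List.takeWhile (fun x => decide (x ≠ ' ')) s, t, htw, ?_, ?_, ?_⟩
  · conv_lhs => rw [← List.takeWhile_append_dropWhile (p := fun x => decide (x ≠ ' ')) (l := s), hdt, hd]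
  · conv_rhs => rw [← List.takeWhile_append_dropWhile (p := fun x => decide (x ≠ ' ')) (l := s), hdt]
    simp
    omega
  · conv_lhs => rw [← List.takeWhile_append_dropWhile (p := fun x => decide (x ≠ ' ')) (l := s), hdt, hd]
    exact pv_splitOn_sep _ t htw

theorem pv_go_ne (sep : List Char) (fuel : Nat) (l cur : List Char) (acc : List (List Char)) :
    PySem.Chars.splitOn.go sep fuel l cur acc ≠ [] := by
  induction fuel generalizing l cur acc with
  | zero => simp [PySem.Chars.splitOn.go]
  | succ n ih =>
    cases l with
    | nil => simp [PySem.Chars.splitOn.go]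
    | cons c rest =>
      rw [PySem.Chars.splitOn.go]
      split
      · exact ih _ _ _
      · exact ih _ _ _

theorem pv_splitOn_ne_nil (s sep : List Char) :
    PySem.Chars.splitOn s sep ≠ [] := pv_go_ne sep (s.length + 1) s [] []

-- every character of every split word is a non-space
theorem pv_splitOn_no_space (s : List Char) :
    ∀ w ∈ PySem.Chars.splitOn s [' '], ∀ c ∈ w, c ≠ ' ' := by
  induction hls : s.length using Nat.strong_induction_on generalizing s with
  | _ n ih =>
    subst hls
    by_cases hsp : ∀ c ∈ s, c ≠ ' '
    · rw [pv_splitOn_no s hsp]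
      intro w hw
      simp at hw
      subst hw
      exact hsp
    · obtain ⟨w0, t, htw, -, hlt, hsplit⟩ := pv_split_step s hsp
      rw [hsplit]
      intro w hw
      rcases List.mem_cons.mp hw with hw | hw
      · subst hw; exact htw
      · exact ih t.length hlt t rfl w hw

-- splitting on ' ' and re-joining with ' ' reconstructs the string
theorem pv_recon (s : List Char) :
    PySem.Chars.join [' '] (PySem.Chars.splitOn s [' ']) = s := by
  induction hls : s.length using Nat.strong_induction_on generalizing s with
  | _ n ih =>
    subst hls
    by_cases hsp : ∀ c ∈ s, c ≠ ' '
    · rw [pv_splitOn_no s hsp, PySem.Chars.join_singleton]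
    · obtain ⟨w0, t, htw, hs, hlt, hsplit⟩ := pv_split_step s hsp
      rw [hsplit, pv_join_cons _ _ (pv_splitOn_ne_nil t [' ']), ih t.length hlt t rfl]
      exact hs.symm

-- ---------- A-side lemmas ----------

theorem pv_pyGet_neg_one {α : Type} (xs : List α) (h : xs ≠ []) (d : α) :
    (PySem.List.pyGet? xs (-1 : Int)).getD d = xs.getLast h := by
  simp only [PySem.List.pyGet?, PySem.List.pyIdx?]
  have hl : 0 < xs.length := List.length_pos_iff.mpr h
  rw [if_neg (by omega), if_pos (by omega)]
  simp only [Option.bind_some]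
  rw [List.getElem?_eq_getElem (by omega)]
  simp [List.getLast_eq_getElem]

theorem pv_slice (xs : List Char) (h : 2 ≤ xs.length) :
    PySem.List.slice xs (some 1) (some (-1)) = xs.tail.dropLast := by
  simp only [PySem.List.slice, PySem.List.clampIdx]
  norm_num
  rw [if_neg (by rintro rfl; simp at h)]
  have h1 : min 1 xs.length = 1 := by omega
  have h2 : ((xs.length : Int) + -1).toNat - 1 = xs.tail.length - 1 := by
    simp [List.length_tail]; omega
  rw [h1, h2, List.drop_one, List.dropLast_eq_take]

-- A's per-word result, for a nonempty word, is the common swap plus a trailing space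
theorem pv_word_eq (word : List Char) (h : word ≠ []) :
    (let start_letter := (PySem.List.pyGet? word (0 : Int)).getD ' '
     let end_letter := (PySem.List.pyGet? word (-1 : Int)).getD ' '
     if word.length > 2 then
       let other_letters := PySem.List.slice word (some 1) (some (-1))
       [end_letter] ++ other_letters ++ [start_letter] ++ [' ']
     else if word.length == 2 then
       [end_letter] ++ [start_letter] ++ [' ']
     else
       word ++ [' ']) = pvSwapWord word ++ [' '] := by
  cases word with
  | nil => cases h rfl
  | cons c cs =>
    cases cs with
    | nil => norm_num [pvSwapWord, PySem.List.pyGet?, PySem.List.pyIdx?]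
    | cons d ds =>
      cases ds with
      | nil => norm_num [pvSwapWord, PySem.List.pyGet?, PySem.List.pyIdx?]
      | cons e es =>
        have hne : (c :: d :: e :: es) ≠ ([] : List Char) := by simp
        have hlast := pv_pyGet_neg_one (c :: d :: e :: es) hne ' '
        have h0 : (PySem.List.pyGet? (c :: d :: e :: es) (0 : Int)).getD ' ' = c := by
          have hh : (0:Int) ≤ (es.length:Int) + 1 + 1 := by positivity
          simp [PySem.List.pyGet?, PySem.List.pyIdx?, hh]
        have hslice := pv_slice (c :: d :: e :: es) (by simp)
        show (if (c :: d :: e :: es).length > 2 then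
            [(PySem.List.pyGet? (c :: d :: e :: es) (-1 : Int)).getD ' ']
              ++ PySem.List.slice (c :: d :: e :: es) (some 1) (some (-1))
              ++ [(PySem.List.pyGet? (c :: d :: e :: es) (0 : Int)).getD ' '] ++ [' ']
          else if (c :: d :: e :: es).length == 2 then
            [(PySem.List.pyGet? (c :: d :: e :: es) (-1 : Int)).getD ' ']
              ++ [(PySem.List.pyGet? (c :: d :: e :: es) (0 : Int)).getD ' '] ++ [' ']
          else (c :: d :: e :: es) ++ [' ']) = _
        rw [if_pos (by simp only [List.length_cons]; omega)]
        rw [hlast, h0, hslice]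
        simp only [pvSwapWord, List.getLastD_eq_getLast?, List.tail_cons, List.getLast_cons]
        rw [List.getLast?_eq_some_getLast (h := by simp)]
        simp [List.getLast_cons]

theorem pv_flatMap_join (f : List Char → List Char) (w : List Char) (ws : List (List Char)) :
    (w :: ws).flatMap (fun x => f x ++ [' ']) =
      PySem.Chars.join [' '] ((w :: ws).map f) ++ [' '] := by
  induction ws generalizing w with
  | nil => simp [PySem.Chars.join_singleton]
  | cons y ys ih =>
    have h1 : List.flatMap (fun x => f x ++ [' ']) (w :: y :: ys)
        = f w ++ [' '] ++ List.flatMap (fun x => f x ++ [' ']) (y :: ys) := by simp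
    rw [h1, ih y]
    simp only [List.map_cons]
    rw [PySem.Chars.join_cons_cons]
    simp

theorem pv_strip_append_space (x : List Char) :
    PySem.Chars.strip (x ++ [' ']) = PySem.Chars.strip x := by
  simp only [PySem.Chars.strip, PySem.Chars.lstrip, PySem.Chars.rstrip]
  rw [List.dropWhile_append]
  by_cases hx : (List.dropWhile PySem.Chars.isspace x).isEmpty
  · rw [if_pos hx]
    rw [List.isEmpty_iff] at hx
    rw [hx]
    simp [PySem.Chars.isspace]
  · rw [if_neg hx]
    simp only [List.reverse_append, List.reverse_cons, List.reverse_nil, List.nil_append,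
      List.singleton_append, List.dropWhile_cons]
    rw [if_pos (by simp [PySem.Chars.isspace])]

theorem pv_flatMap_eq (g : List Char → List Char) (ws : List (List Char))
    (hg : ∀ w ∈ ws, w ≠ [] → g w = pvSwapWord w ++ [' '])
    (h : ∀ w ∈ ws, w ≠ []) :
    ws.flatMap g = ws.flatMap (fun w => pvSwapWord w ++ [' ']) := by
  induction ws with
  | nil => rfl
  | cons w ws ih =>
    simp only [List.flatMap_cons]
    rw [hg w (by simp) (h w (by simp)), ih (fun x hx => hg x (by simp [hx])) (fun x hx => h x (by simp [hx]))]

-- ===== VERDICT (by name: the statement is the Claim_ definition above) =====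
theorem swap_first_and_last_letter_spec : Claim_equal_swap_first_and_last_letter := by
  intro message _dom hpre
  unfold Spec_swap_first_and_last_letter swap_first_and_last_letter
  rw [pvAlt_eq]
  simp only []
  rw [PySem.List.foldl_append_eq_flatMap]
  rw [pv_flatMap_eq _ _ (fun w _ hw => pv_word_eq w hw) hpre]
  obtain ⟨w, ws, hws⟩ := List.exists_cons_of_ne_nil
    (pv_splitOn_ne_nil message.toList [' '])
  rw [hws, pv_flatMap_join pvSwapWord w ws, List.nil_append, pv_strip_append_space]
  have hwords := pv_splitOn_no_space message.toList
  rw [hws] at hwords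
  have hout : pvOutOf message.toList = PySem.Chars.join [' '] ((w :: ws).map pvSwapWord) := by
    have hr := pv_recon message.toList
    rw [hws] at hr
    conv_lhs => rw [← hr]
    exact pvOut_words (w :: ws) (by simp) hwords
  rw [hout]
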